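-- pv_equiv track=rewrite | github.com/destor01/2048_py | 2048.py | movizquierda
-- ===== SOURCE A (Python) =====
-- def movizquierda(M):
--   aux = M
--   x=0
--   while x <= 2:
--     if x == 0:
--       for c in range(0,4):
--         if aux[c][x] == " ":
--           if M[c][x+1] != " ":
--             M[c][x]=M[c][x+1]
--             M[c][x+1] = " "
--           elif M[c][x+2] != " ":
--             M[c][x]=M[c][x+2]
--             M[c][x+2] = " "
--           elif M[c][x+3] != " ":
--             M[c][x]=M[c][x+3]
--             M[c][x+3] = " "
--     elif x == 1:
--       for c in range(0,4):
--         if aux[c][x] == " ":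
--           if M[c][x+1] != " ":
--             M[c][x]=M[c][x+1]
--             M[c][x+1] = " "
--           elif M[c][x+2] != " ":
--             M[c][x]=M[c][x+2]
--             M[c][x+2] = " "
--     elif x == 2:
--       for c in range(0,4):
--         if aux[c][x] == " ":
--           if M[c][x+1] != " ":
--             M[c][x]=M[c][x+1]
--             M[c][x+1] = " "
--     x = x + 1
--   return aux
-- ===== SOURCE B (Python) =====
-- # Slides each of the first 4 rows' first 4 tiles left over blanks by a single
-- # filter-and-rewrite pass per row (mutates M in place and returns it, like A).
-- def movizquierda(M):
--   for c in range(4):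
--     tiles = [M[c][j] for j in range(4) if M[c][j] != " "]
--     for j in range(4):
--       M[c][j] = tiles[j] if j < len(tiles) else " "
--   return M
-- ===== Notes on version B (the rewrite author's own statement) =====
-- stated objective: simpler
-- what changed: Replaces A's three position-specific if/elif shift cascades (one pass per column x=0,1,2, each probing up to 3 cells ahead) with one uniform filter-nonblank-then-rewrite pass per row.
import Mathlib
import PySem

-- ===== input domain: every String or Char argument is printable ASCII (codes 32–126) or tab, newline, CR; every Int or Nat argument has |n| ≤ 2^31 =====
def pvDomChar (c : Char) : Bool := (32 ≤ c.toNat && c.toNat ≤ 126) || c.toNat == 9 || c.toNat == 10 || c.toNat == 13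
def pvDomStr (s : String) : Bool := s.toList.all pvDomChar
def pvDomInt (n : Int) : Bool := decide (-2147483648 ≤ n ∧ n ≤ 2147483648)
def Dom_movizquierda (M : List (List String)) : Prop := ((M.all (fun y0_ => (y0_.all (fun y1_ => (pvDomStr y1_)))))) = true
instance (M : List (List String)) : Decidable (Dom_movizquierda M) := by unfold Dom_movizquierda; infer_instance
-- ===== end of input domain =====

-- ===== PORT A =====
-- B is a per-row filter-and-rewrite instead of A's three column-wise shift cascades (objective: simpler).
-- Both Pythons mutate M in place and return the same object; the equivalence proved is about the RETURN value.
-- Single (c,x) body of A for x = 0: probe cells 1,2,3 (aux aliases M, so aux[c][x] is the current cell).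
def pyRowStep0 (r : List String) : List String :=
  if r.getD 0 "" = " " then
    if r.getD 1 "" ≠ " " then (r.set 0 (r.getD 1 "")).set 1 " "
    else if r.getD 2 "" ≠ " " then (r.set 0 (r.getD 2 "")).set 2 " "
    else if r.getD 3 "" ≠ " " then (r.set 0 (r.getD 3 "")).set 3 " "
    else r
  else r

-- body for x = 1: probe cells 2,3
def pyRowStep1 (r : List String) : List String :=
  if r.getD 1 "" = " " then
    if r.getD 2 "" ≠ " " then (r.set 1 (r.getD 2 "")).set 2 " "
    else if r.getD 3 "" ≠ " " then (r.set 1 (r.getD 3 "")).set 3 " "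
    else r
  else r

-- body for x = 2: probe cell 3
def pyRowStep2 (r : List String) : List String :=
  if r.getD 2 "" = " " then
    if r.getD 3 "" ≠ " " then (r.set 2 (r.getD 3 "")).set 3 " "
    else r
  else r

-- 'for c in range(0,4)': apply the body to row c (Python only reads/writes inside row c)
def pyPass (f : List String → List String) (M : List (List String)) : List (List String) :=
  (List.range 4).foldl (fun Mm c => Mm.set c (f (Mm.getD c []))) M

-- while x <= 2: the x = 0 pass, then x = 1, then x = 2; return aux (= M)
def movizquierda (M : List (List String)) : List (List String) :=
  pyPass pyRowStep2 (pyPass pyRowStep1 (pyPass pyRowStep0 M))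

-- ===== PORT B =====
-- tiles = [M[c][j] for j in range(4) if M[c][j] != " "]; then rewrite cells 0..3
def bRow (r : List String) : List String :=
  let tiles := (List.range 4).foldl (fun acc j => if r.getD j "" ≠ " " then acc ++ [r.getD j ""] else acc) []
  (List.range 4).foldl (fun rr j => rr.set j (if j < tiles.length then tiles.getD j " " else " ")) r

def movizquierda_alt (M : List (List String)) : List (List String) :=
  (List.range 4).foldl (fun Mm c => Mm.set c (bRow (Mm.getD c []))) M

-- ===== PRECONDITION & SPEC =====
-- Pre_ excludes exactly the inputs where Python A raises IndexError:
-- fewer than 4 rows, or one of the first 4 rows shorter than 4.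
def Pre_movizquierda (M : List (List String)) : Prop :=
  4 ≤ M.length ∧ ∀ r ∈ M.take 4, 4 ≤ r.length
instance (M : List (List String)) : Decidable (Pre_movizquierda M) := by
  unfold Pre_movizquierda; infer_instance
def pvWitness_movizquierda : List (List String) :=
  [[" ", "2", " ", "4"], ["2", " ", " ", "2"], [" ", " ", " ", "8"], ["4", "4", "2", " "]]

def Spec_movizquierda (M : List (List String)) (out : List (List String)) : Prop := out = movizquierda_alt M
instance (M : List (List String)) (out : List (List String)) : Decidable (Spec_movizquierda M out) := by unfold Spec_movizquierda; infer_instance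

-- ===== CLAIM (what is proved, stated in full; the proofs are below) =====
def Claim_equal_movizquierda : Prop := ∀ (M : List (List String)), Dom_movizquierda M → Pre_movizquierda M → Spec_movizquierda M (movizquierda M)

-- ===== LEMMAS AND PROOFS =====
-- a pass over c = 0,1,2,3 on a board with ≥ 4 rows acts row-wise
theorem pass4 (f : List String → List String) (r0 r1 r2 r3 : List String)
    (rest : List (List String)) :
    (List.range 4).foldl (fun Mm c => Mm.set c (f (Mm.getD c []))) (r0 :: r1 :: r2 :: r3 :: rest)
      = f r0 :: f r1 :: f r2 :: f r3 :: rest := by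
  simp [List.range_succ, List.getD]

-- A's three steps on one row of length ≥ 4 equal B's filter-and-rewrite
theorem rowEq (a b c d : String) (t : List String) :
    pyRowStep2 (pyRowStep1 (pyRowStep0 (a :: b :: c :: d :: t))) = bRow (a :: b :: c :: d :: t) := by
  by_cases ha : a = " " <;> by_cases hb : b = " " <;> by_cases hc : c = " " <;> by_cases hd : d = " " <;>
    simp [pyRowStep0, pyRowStep1, pyRowStep2, bRow, ha, hb, hc, hd, List.range_succ, List.getD]

theorem row4 (r : List String) (h : 4 ≤ r.length) :
    ∃ a b c d t, r = a :: b :: c :: d :: t := by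
  match r, h with
  | a :: b :: c :: d :: t, _ => exact ⟨a, b, c, d, t, rfl⟩

-- ===== VERDICT (by name: the statement is the Claim_ definition above) =====
theorem movizquierda_spec : Claim_equal_movizquierda := by
  intro M _ hp
  obtain ⟨hlen, hrows⟩ := hp
  match M, hlen with
  | r0 :: r1 :: r2 :: r3 :: rest, _ =>
    obtain ⟨a0, b0, c0, d0, t0, h0⟩ := row4 r0 (hrows r0 (by simp))
    obtain ⟨a1, b1, c1, d1, t1, h1⟩ := row4 r1 (hrows r1 (by simp))
    obtain ⟨a2, b2, c2, d2, t2, h2⟩ := row4 r2 (hrows r2 (by simp))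
    obtain ⟨a3, b3, c3, d3, t3, h3⟩ := row4 r3 (hrows r3 (by simp))
    subst h0 h1 h2 h3
    show _ = _
    simp only [movizquierda, movizquierda_alt, pyPass, pass4, rowEq]
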